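-- pv_equiv track=rewrite | github.com/981377660LMT/algorithm-study | 22_专题/区间频率查询/rangeCountQueryOffline.py | rangeCountQueryOffline
-- ===== SOURCE A (Python) =====
-- from collections import defaultdict
-- from typing import List, Tuple
--
-- def rangeCountQueryOffline(nums: List[int], queries: List[Tuple[int, int, int]]) -> List[int]:
--     """
--     O(n+q)离线区间频率查询.
--     基于扫描线+前缀和实现.
--     """
--     n, q = len(nums), len(queries)
--     res = [0] * q
--     counter = defaultdict(lambda: 1)
--     events = [[] for _ in range(n + 1)]
--     for i, (start, end, target) in enumerate(queries):
--         events[start].append((i, target))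
--         events[end].append((i, target))
--     for i in range(n + 1):
--         for j, target in events[i]:
--             if not res[j]:
--                 res[j] -= counter[target]
--             else:
--                 res[j] += counter[target]
--         if i == n:
--             break
--         counter[nums[i]] += 1
--     return res
-- ===== SOURCE B (Python) =====
-- def rangeCountQueryOffline(nums, queries):
--     """
--     Range frequency by per-value prefix counts.
--
--     For each queried value, build (once, memoized) its prefix-count array
--     pref of length n+1, where pref[p] = occurrences among the first p
--     elements.  A query's answer is |pref[end] - pref[start]|: the number of
--     occurrences of target between the two boundary positions.
--     """
--     pref_cache = {}
--     res = []
--     for start, end, target in queries: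
--         if target not in pref_cache:
--             acc = [0]
--             for x in nums:
--                 acc.append(acc[-1] + (x == target))
--             pref_cache[target] = acc
--         pref = pref_cache[target]
--         res.append(abs(pref[end] - pref[start]))
--     return res
-- ===== Notes on version B (the rewrite author's own statement) =====
-- stated objective: alternative
-- what changed: Replaced the offline scanline (event buckets over n+1 slots, a running defaultdict counter with default 1, and a sign-flip trick on the shared result array) by memoized per-value prefix-count arrays: each query is answered independently as the absolute difference of two prefix counts; Pre_ excludes only the inputs where A raises IndexError (a query bound outside the n+1 boundary slots).
import Mathlib
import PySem

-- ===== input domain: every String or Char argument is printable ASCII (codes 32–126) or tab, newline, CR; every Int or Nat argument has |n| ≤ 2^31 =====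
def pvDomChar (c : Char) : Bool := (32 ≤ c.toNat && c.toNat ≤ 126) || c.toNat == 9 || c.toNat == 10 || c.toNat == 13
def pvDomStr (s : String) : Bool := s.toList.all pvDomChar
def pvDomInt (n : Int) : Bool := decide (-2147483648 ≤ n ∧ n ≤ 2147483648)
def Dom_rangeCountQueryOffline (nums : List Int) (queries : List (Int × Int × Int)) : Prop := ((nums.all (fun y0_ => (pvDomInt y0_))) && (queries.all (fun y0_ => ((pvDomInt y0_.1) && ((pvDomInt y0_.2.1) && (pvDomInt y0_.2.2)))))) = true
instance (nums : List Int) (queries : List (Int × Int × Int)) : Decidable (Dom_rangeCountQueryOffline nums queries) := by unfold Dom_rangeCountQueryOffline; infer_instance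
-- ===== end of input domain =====

-- B replaces A's scanline (event buckets, running default-1 counter, sign-flip trick on a
-- shared result array) by memoized per-value prefix-count arrays answered per query: same values.

-- ===== PORT A =====
-- events[p].append(x) on the Python list-of-lists (python index p, negative allowed);
-- total form of the in-place update, exact under Pre_ (p in range)
def pvBucketApp (ev : List (List (Int × Int))) (p : Int) (x : Int × Int) :
    List (List (Int × Int)) :=
  PySem.List.pySetD ev p (PySem.List.pyGetD ev p [] ++ [x])

-- loop body of 'for i, (start, end, target) in enumerate(queries)'
def pvBuildStep (ev : List (List (Int × Int))) (p : Int × (Int × Int × Int)) :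
    List (List (Int × Int)) :=
  pvBucketApp (pvBucketApp ev p.2.1 (p.1, p.2.2.2)) p.2.2.1 (p.1, p.2.2.2)

-- one event entry: 'if not res[j]: res[j] -= counter[target] else: res[j] += counter[target]'
-- (counter is a defaultdict(lambda: 1): reads use default 1; the insertion a defaultdict
-- read performs only stores that same default, so the stored values are exact)
def pvEventStep (counter : PySem.Dict Int Int) (res : List Int) (jt : Int × Int) : List Int :=
  if PySem.List.pyGetD res jt.1 0 == 0 then
    PySem.List.pySetD res jt.1 (PySem.List.pyGetD res jt.1 0 - PySem.Dict.getD counter jt.2 1)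
  else
    PySem.List.pySetD res jt.1 (PySem.List.pyGetD res jt.1 0 + PySem.Dict.getD counter jt.2 1)

-- loop body of 'for i in range(n + 1)': process events[i]; the 'if i == n: break' skips
-- the final counter update; 'counter[nums[i]] += 1'
def pvScanStep (nums : List Int) (events : List (List (Int × Int)))
    (st : List Int × PySem.Dict Int Int) (i : Int) : List Int × PySem.Dict Int Int :=
  let res := (PySem.List.pyGetD events i []).foldl (pvEventStep st.2) st.1
  if i == PySem.List.len nums then (res, st.2)
  else
    (res,
      st.2.insert (PySem.List.pyGetD nums i 0)
        (st.2.getD (PySem.List.pyGetD nums i 0) 1 + 1))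

def rangeCountQueryOffline (nums : List Int) (queries : List (Int × Int × Int)) : List Int :=
  let n : Int := PySem.List.len nums
  let q : Int := PySem.List.len queries
  let res : List Int := List.replicate q.toNat 0
  let counter : PySem.Dict Int Int := PySem.Dict.empty
  let events : List (List (Int × Int)) := List.replicate (n + 1).toNat []
  let events := (PySem.List.enumerate queries 0).foldl pvBuildStep events
  let st := (PySem.List.pyRange 0 (n + 1) 1).foldl (pvScanStep nums events) (res, counter)
  st.1

-- ===== PORT B =====
-- inner loop 'for x in nums: acc.append(acc[-1] + (x == target))'
-- (acc[-1] via pyGetD: exact, acc is never empty; the bool added to an int is 1/0)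
def pvAccStep (t : Int) (acc : List Int) (x : Int) : List Int :=
  acc ++ [PySem.List.pyGetD acc (-1) 0 + (if x == t then 1 else 0)]

-- the prefix-count array built for one target
def pvPrefOf (nums : List Int) (t : Int) : List Int := nums.foldl (pvAccStep t) [0]

-- body of 'for start, end, target in queries' (state: pref_cache, res);
-- pref[end] / pref[start] via pyGetD (python indexing, exact under Pre_);
-- abs on an int ported as its if-form
def pvQStep (nums : List Int) (st : PySem.Dict Int (List Int) × List Int)
    (pq : Int × Int × Int) : PySem.Dict Int (List Int) × List Int :=
  let cache := if st.1.contains pq.2.2 then st.1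
               else st.1.insert pq.2.2 (pvPrefOf nums pq.2.2)
  let pref := cache.getD pq.2.2 []
  let d := PySem.List.pyGetD pref pq.2.1 0 - PySem.List.pyGetD pref pq.1 0
  (cache, st.2 ++ [if d < 0 then -d else d])

def rangeCountQueryOffline_alt (nums : List Int) (queries : List (Int × Int × Int)) : List Int :=
  (queries.foldl (pvQStep nums) (PySem.Dict.empty, [])).2

-- ===== PRECONDITION & SPEC =====
-- Pre_ excludes exactly the inputs on which A raises IndexError: a query bound start/end
-- outside [-(n+1), n], the valid Python indices of the (n+1)-slot event list.
def Pre_rangeCountQueryOffline (nums : List Int) (queries : List (Int × Int × Int)) : Prop :=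
  ∀ p ∈ queries, PySem.Raise.InRange (nums.length + 1) p.1 ∧
    PySem.Raise.InRange (nums.length + 1) p.2.1
instance (nums : List Int) (queries : List (Int × Int × Int)) :
    Decidable (Pre_rangeCountQueryOffline nums queries) := by
  unfold Pre_rangeCountQueryOffline; infer_instance

def pvWitness_rangeCountQueryOffline : List Int × (List (Int × Int × Int)) :=
  ([1, 2, 1], [(0, 3, 1), (-1, 0, 1), (2, 1, 2)])

def Spec_rangeCountQueryOffline (nums : List Int) (queries : List (Int × Int × Int)) (out : List Int) : Prop := out = rangeCountQueryOffline_alt nums queries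
instance (nums : List Int) (queries : List (Int × Int × Int)) (out : List Int) : Decidable (Spec_rangeCountQueryOffline nums queries out) := by unfold Spec_rangeCountQueryOffline; infer_instance

-- ===== CLAIM (what is proved, stated in full; the proofs are below) =====
def Claim_equal_rangeCountQueryOffline : Prop := ∀ (nums : List Int) (queries : List (Int × Int × Int)), Dom_rangeCountQueryOffline nums queries → Pre_rangeCountQueryOffline nums queries → Spec_rangeCountQueryOffline nums queries (rangeCountQueryOffline nums queries)

-- ===== LEMMAS AND PROOFS =====

-- the Nat index a valid Python index i denotes in a list of length len
def pvIdx (len : Nat) (i : Int) : Nat := if 0 ≤ i then i.toNat else len - (-i).toNat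

-- number of occurrences of t among the first p elements, as an Int
def pvCnt (nums : List Int) (t : Int) (p : Nat) : Int := ((nums.take p).count t : Int)

-- the common per-query value both programs return
def pvF (nums : List Int) (pq : Int × Int × Int) : Int :=
  pvCnt nums pq.2.2 (max (pvIdx (nums.length + 1) pq.1) (pvIdx (nums.length + 1) pq.2.1)) -
    pvCnt nums pq.2.2 (min (pvIdx (nums.length + 1) pq.1) (pvIdx (nums.length + 1) pq.2.1))

-- contents of event bucket i after the building loop over the enumerated queries E
def pvBucketsOf (len : Nat) (E : List (Int × (Int × Int × Int))) (i : Nat) :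
    List (Int × Int) :=
  E.flatMap (fun p =>
    (if pvIdx len p.2.1 = i then [(p.1, p.2.2.2)] else []) ++
      (if pvIdx len p.2.2.1 = i then [(p.1, p.2.2.2)] else []))

-- effect of one event entry with target t on the value v = res[j]
def pvG (c : PySem.Dict Int Int) (v : Int) (t : Int) : Int :=
  if v = 0 then v - c.getD t 1 else v + c.getD t 1

-- value of res[j] at the start of scan iteration m
def pvPhi (nums : List Int) (queries : List (Int × Int × Int)) (j m : Nat) : Int :=
  let pq := queries.getD j (0, 0, 0)
  let a := pvIdx (nums.length + 1) pq.1
  let b := pvIdx (nums.length + 1) pq.2.1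
  if m ≤ min a b then 0
  else if m ≤ max a b ∧ min a b < max a b then -(1 + pvCnt nums pq.2.2 (min a b))
  else pvCnt nums pq.2.2 (max a b) - pvCnt nums pq.2.2 (min a b)

theorem pvIdx?_eq_pvIdx {len : Nat} {i : Int} (h : PySem.Raise.InRange len i) :
    PySem.List.pyIdx? len i = some (pvIdx len i) := by
  unfold PySem.Raise.InRange at h
  simp only [PySem.List.pyIdx?, pvIdx]
  split_ifs with h0 h1 <;> simp_all

theorem pvIdx_lt {len : Nat} {i : Int} (h : PySem.Raise.InRange len i) :
    pvIdx len i < len := by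
  unfold PySem.Raise.InRange at h
  unfold pvIdx
  split_ifs with h0 <;> omega

theorem pvGetD_idx {α : Type} (xs : List α) {i : Int} (d : α)
    (h : PySem.Raise.InRange xs.length i) :
    PySem.List.pyGetD xs i d = xs.getD (pvIdx xs.length i) d := by
  have hi := pvIdx?_eq_pvIdx h
  have hlt := pvIdx_lt h
  simp only [PySem.List.pyGetD, PySem.List.pyGet?, hi, Option.bind_some]
  rw [List.getElem?_eq_getElem hlt, List.getD_eq_getElem _ _ hlt]
  rfl

theorem pvSetD_idx {α : Type} (xs : List α) {i : Int} (v : α)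
    (h : PySem.Raise.InRange xs.length i) :
    PySem.List.pySetD xs i v = xs.set (pvIdx xs.length i) v := by
  have hi := pvIdx?_eq_pvIdx h
  simp only [PySem.List.pySetD, PySem.List.pySet?, hi, Option.map_some, Option.getD_some]

theorem pvCnt_add (nums : List Int) (t : Int) {a b : Nat} (hab : a ≤ b) :
    pvCnt nums t a + (((nums.drop a).take (b - a)).count t : Int) = pvCnt nums t b := by
  unfold pvCnt
  have : b = a + (b - a) := by omega
  rw [this, List.take_add, List.count_append]
  have h2 : a + (b - a) - a = b - a := by omega
  rw [h2]; push_cast; ring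

theorem pvCnt_mono (nums : List Int) (t : Int) {a b : Nat} (hab : a ≤ b) :
    pvCnt nums t a ≤ pvCnt nums t b := by
  have := pvCnt_add nums t hab
  have h0 : (0 : Int) ≤ (((nums.drop a).take (b - a)).count t : Int) := Int.natCast_nonneg _
  omega

theorem pvCnt_succ (nums : List Int) (t : Int) {m : Nat} (hm : m < nums.length) :
    pvCnt nums t (m + 1) = pvCnt nums t m + (if nums.getD m 0 = t then 1 else 0) := by
  unfold pvCnt
  rw [List.take_add_one, List.getElem?_eq_getElem hm, List.getD_eq_getElem _ _ hm]
  simp only [Option.toList_some, List.count_append, List.count_singleton]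
  rcases eq_or_ne (nums[m]) t with h | h
  · simp [h]
  · simp [h, beq_iff_eq]

-- getD after set, total form
theorem pv_getD_set {α : Type} (l : List α) (i j : Nat) (v d : α) :
    (l.set i v).getD j d = if i = j ∧ i < l.length then v else l.getD j d := by
  rw [List.getD_eq_getElem?_getD, List.getD_eq_getElem?_getD, List.getElem?_set]
  split_ifs with h1 h2 h3 h4 <;> simp_all
  omega

-- ---------- B side ----------

-- the prefix-count array for target t is the list of prefix counts
theorem pvPref_aux (t : Int) (xs L : List Int) (c : Int) (hL : L ≠ [])
    (hc : PySem.List.pyGetD L (-1) 0 = c) :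
    xs.foldl (pvAccStep t) L =
      L ++ (List.range xs.length).map (fun k => c + ((xs.take (k + 1)).count t : Int)) := by
  induction xs generalizing L c with
  | nil => simp
  | cons x xs ih =>
    rw [List.foldl_cons]
    have hstep : pvAccStep t L x = L ++ [c + (if x == t then 1 else 0)] := by
      unfold pvAccStep; rw [hc]
    rw [hstep, ih (L ++ [c + (if x == t then 1 else 0)]) (c + (if x == t then 1 else 0))
      (by simp) (PySem.List.pyGetD_neg_one_append_singleton _ _ _)]
    rw [List.append_assoc]
    congr 1
    rw [List.length_cons, List.range_succ_eq_map, List.map_cons, List.map_map]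
    simp only [List.singleton_append]
    congr 1
    · simp [List.count_cons, beq_iff_eq]
    · apply List.map_congr_left
      intro k _
      simp only [Function.comp_apply, List.take_succ_cons, List.count_cons, beq_iff_eq]
      split_ifs with h1 <;> simp_all
      all_goals push_cast
      all_goals ring

theorem pvPref_eq (nums : List Int) (t : Int) :
    pvPrefOf nums t = (List.range (nums.length + 1)).map (fun p => pvCnt nums t p) := by
  unfold pvPrefOf
  rw [pvPref_aux t nums [0] 0 (by simp) (by decide)]
  rw [List.range_succ_eq_map, List.map_cons, List.map_map, List.singleton_append]
  have h0 : pvCnt nums t 0 = 0 := by simp [pvCnt]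
  rw [h0]
  congr 1
  apply List.map_congr_left
  intro k _
  simp only [Function.comp_apply, pvCnt, Nat.succ_eq_add_one]
  omega

theorem pvPref_length (nums : List Int) (t : Int) :
    (pvPrefOf nums t).length = nums.length + 1 := by
  rw [pvPref_eq]; simp

theorem pvPref_getD (nums : List Int) (t : Int) {x : Int}
    (hx : PySem.Raise.InRange (nums.length + 1) x) :
    PySem.List.pyGetD (pvPrefOf nums t) x 0 = pvCnt nums t (pvIdx (nums.length + 1) x) := by
  have hlen := pvPref_length nums t
  have hx' : PySem.Raise.InRange (pvPrefOf nums t).length x := by rw [hlen]; exact hx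
  rw [pvGetD_idx _ _ hx', hlen]
  have hlt := pvIdx_lt hx
  rw [pvPref_eq, List.getD_eq_getElem _ _ (by simpa using hlt), List.getElem_map,
    List.getElem_range]

-- the value B appends for one query, given its prefix array is correct
theorem pvQ_val (nums : List Int) (pq : Int × Int × Int)
    (h1 : PySem.Raise.InRange (nums.length + 1) pq.1)
    (h2 : PySem.Raise.InRange (nums.length + 1) pq.2.1) :
    (if PySem.List.pyGetD (pvPrefOf nums pq.2.2) pq.2.1 0 -
          PySem.List.pyGetD (pvPrefOf nums pq.2.2) pq.1 0 < 0
     then -(PySem.List.pyGetD (pvPrefOf nums pq.2.2) pq.2.1 0 -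
          PySem.List.pyGetD (pvPrefOf nums pq.2.2) pq.1 0)
     else PySem.List.pyGetD (pvPrefOf nums pq.2.2) pq.2.1 0 -
          PySem.List.pyGetD (pvPrefOf nums pq.2.2) pq.1 0) = pvF nums pq := by
  rw [pvPref_getD nums pq.2.2 h2, pvPref_getD nums pq.2.2 h1]
  set a := pvIdx (nums.length + 1) pq.1
  set b := pvIdx (nums.length + 1) pq.2.1
  unfold pvF
  rcases Nat.le_total a b with hab | hab
  · have hm := pvCnt_mono nums pq.2.2 hab
    rw [Nat.max_eq_right hab, Nat.min_eq_left hab]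
    rw [if_neg (by omega)]
  · have hm := pvCnt_mono nums pq.2.2 hab
    rw [Nat.max_eq_left hab, Nat.min_eq_right hab]
    rcases lt_or_ge (pvCnt nums pq.2.2 b - pvCnt nums pq.2.2 a) 0 with h | h
    · rw [if_pos h]; ring
    · rw [if_neg (by omega)]; omega

-- the query fold: cache entries are always the prefix array of their key
theorem pv_alt_inv (nums : List Int) (qs : List (Int × Int × Int))
    (cache : PySem.Dict Int (List Int)) (res : List Int)
    (hcache : ∀ t l, cache.get? t = some l → l = pvPrefOf nums t)
    (hq : ∀ p ∈ qs, PySem.Raise.InRange (nums.length + 1) p.1 ∧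
      PySem.Raise.InRange (nums.length + 1) p.2.1) :
    (qs.foldl (pvQStep nums) (cache, res)).2 = res ++ qs.map (pvF nums) := by
  induction qs generalizing cache res with
  | nil => simp
  | cons pq qs ih =>
    obtain ⟨h1, h2⟩ := hq pq List.mem_cons_self
    rw [List.foldl_cons]
    set cache' := if cache.contains pq.2.2 then cache
                  else cache.insert pq.2.2 (pvPrefOf nums pq.2.2) with hc'
    have hcache' : ∀ t l, cache'.get? t = some l → l = pvPrefOf nums t := by
      intro t l hl
      rw [hc'] at hl
      split_ifs at hl with hcont
      · exact hcache t l hl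
      · rcases eq_or_ne t pq.2.2 with rfl | hne
        · rw [PySem.Dict.get?_insert_self] at hl
          exact (Option.some_inj.mp hl).symm
        · rw [PySem.Dict.get?_insert_of_ne _ _ (by simpa using hne)] at hl
          exact hcache t l hl
    have hpref : cache'.getD pq.2.2 [] = pvPrefOf nums pq.2.2 := by
      rcases hget : cache'.get? pq.2.2 with _ | l
      · exfalso
        rw [hc'] at hget
        split_ifs at hget with hcont
        · rw [PySem.Dict.contains_eq_isSome_get?, hget] at hcont
          simp at hcont
        · rw [PySem.Dict.get?_insert_self] at hget
          simp at hget
      · rw [PySem.Dict.getD_eq_get?_getD, hget, Option.getD_some]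
        exact hcache' _ _ hget
    have hstep : pvQStep nums (cache, res) pq =
        (cache', res ++ [pvF nums pq]) := by
      unfold pvQStep
      simp only [← hc', hpref]
      rw [pvQ_val nums pq h1 h2]
    rw [hstep, ih cache' (res ++ [pvF nums pq]) hcache'
      (fun p hp => hq p (List.mem_cons_of_mem _ hp))]
    simp

-- B equals the per-query map
theorem pv_alt_eq_map (nums : List Int) (queries : List (Int × Int × Int))
    (hpre : Pre_rangeCountQueryOffline nums queries) :
    rangeCountQueryOffline_alt nums queries = queries.map (pvF nums) := by
  unfold rangeCountQueryOffline_alt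
  rw [pv_alt_inv nums queries PySem.Dict.empty []
    (by intro t l hl; rw [PySem.Dict.get?_empty] at hl; exact absurd hl (by simp)) hpre]
  simp

-- ---------- A side ----------

theorem pvBucketApp_length (ev : List (List (Int × Int))) (p : Int) (x : Int × Int) :
    (pvBucketApp ev p x).length = ev.length := by
  unfold pvBucketApp
  exact PySem.List.length_pySetD _ _ _

theorem pvBucketApp_getD (ev : List (List (Int × Int))) {p : Int} (x : Int × Int)
    (i : Nat) (h : PySem.Raise.InRange ev.length p) :
    (pvBucketApp ev p x).getD i [] =
      if pvIdx ev.length p = i then ev.getD i [] ++ [x] else ev.getD i [] := by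
  unfold pvBucketApp
  rw [pvSetD_idx _ _ h, pvGetD_idx _ _ h, pv_getD_set]
  have hlt := pvIdx_lt h
  by_cases hi : pvIdx ev.length p = i
  · rw [if_pos hi, if_pos ⟨hi, hlt⟩, hi]
  · rw [if_neg hi, if_neg (fun hc => hi hc.1)]

-- bucket contents after the building loop
theorem pv_build_getD (E : List (Int × (Int × Int × Int)))
    (ev : List (List (Int × Int))) (i : Nat)
    (hE : ∀ p ∈ E, PySem.Raise.InRange ev.length p.2.1 ∧
      PySem.Raise.InRange ev.length p.2.2.1) :
    (E.foldl pvBuildStep ev).getD i [] = ev.getD i [] ++ pvBucketsOf ev.length E i := by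
  induction E generalizing ev with
  | nil => simp [pvBucketsOf]
  | cons p E ih =>
    obtain ⟨hp1, hp2⟩ := hE p List.mem_cons_self
    have hlen1 : (pvBucketApp ev p.2.1 (p.1, p.2.2.2)).length = ev.length :=
      pvBucketApp_length _ _ _
    have hlen2 : (pvBuildStep ev p).length = ev.length := by
      unfold pvBuildStep; rw [pvBucketApp_length, pvBucketApp_length]
    rw [List.foldl_cons]
    rw [ih (pvBuildStep ev p) (by rw [hlen2]; exact fun r hr => hE r (List.mem_cons_of_mem _ hr))]
    rw [hlen2]
    have hstep : (pvBuildStep ev p).getD i [] =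
        ev.getD i [] ++ ((if pvIdx ev.length p.2.1 = i then [(p.1, p.2.2.2)] else []) ++
          (if pvIdx ev.length p.2.2.1 = i then [(p.1, p.2.2.2)] else [])) := by
      unfold pvBuildStep
      rw [pvBucketApp_getD _ _ _ (by rw [hlen1]; exact hp2), hlen1,
        pvBucketApp_getD _ _ _ hp1]
      split_ifs <;> simp
    rw [hstep]
    unfold pvBucketsOf
    rw [List.flatMap_cons, List.append_assoc]

-- every bucket entry carries an enumeration index and its query's target
theorem pv_bucket_mem {len : Nat} {qs : List (Int × Int × Int)} {s : Int} {i : Nat}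
    {e : Int × Int} (he : e ∈ pvBucketsOf len (PySem.List.enumerate qs s) i) :
    ∃ k : Nat, ∃ hk : k < qs.length, e.1 = s + k ∧ e.2 = (qs[k]).2.2 := by
  unfold pvBucketsOf at he
  rw [List.mem_flatMap] at he
  obtain ⟨p, hp, hep⟩ := he
  rw [PySem.List.mem_enumerate_iff] at hp
  obtain ⟨k, hk, rfl⟩ := hp
  refine ⟨k, hk, ?_⟩
  rw [List.mem_append] at hep
  rcases hep with h | h <;> (
    split_ifs at h <;> simp only [List.mem_singleton, List.not_mem_nil] at h <;>
      first
        | exact absurd h (fun hc => hc)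
        | (subst h; exact ⟨rfl, rfl⟩))

theorem pvBucketsOf_cons (len : Nat) (p : Int × (Int × Int × Int))
    (E : List (Int × (Int × Int × Int))) (i : Nat) :
    pvBucketsOf len (p :: E) i =
      ((if pvIdx len p.2.1 = i then [(p.1, p.2.2.2)] else []) ++
        (if pvIdx len p.2.2.1 = i then [(p.1, p.2.2.2)] else [])) ++
        pvBucketsOf len E i := by
  unfold pvBucketsOf
  rw [List.flatMap_cons]

-- the entries of bucket i belonging to enumeration index s + j
theorem pv_bucket_filter (len : Nat) (qs : List (Int × Int × Int)) (s : Int) (i : Nat)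
    (j : Nat) (hj : j < qs.length) :
    (pvBucketsOf len (PySem.List.enumerate qs s) i).filter
        (fun e => e.1 == s + (j : Int)) =
      (if pvIdx len (qs[j]).1 = i then [(s + (j : Int), (qs[j]).2.2)] else []) ++
        (if pvIdx len (qs[j]).2.1 = i then [(s + (j : Int), (qs[j]).2.2)] else []) := by
  induction qs generalizing s j with
  | nil => exact absurd hj (Nat.not_lt_zero j)
  | cons x qs ih =>
    rw [PySem.List.enumerate_cons]
    rw [pvBucketsOf_cons, List.filter_append]
    have htail : ∀ tgt : Int, tgt < s + 1 →
        (pvBucketsOf len (PySem.List.enumerate qs (s + 1)) i).filter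
          (fun e => e.1 == tgt) = [] := by
      intro tgt htgt
      rw [List.filter_eq_nil_iff]
      intro e he
      obtain ⟨k, hk, he1, _⟩ := pv_bucket_mem he
      simp only [beq_iff_eq]
      omega
    cases j with
    | zero =>
      have hhead : (((if pvIdx len x.1 = i then [(s, x.2.2)] else []) ++
          (if pvIdx len x.2.1 = i then [(s, x.2.2)] else [])).filter
            (fun e => e.1 == s + ((0 : Nat) : Int))) =
          ((if pvIdx len x.1 = i then [(s, x.2.2)] else []) ++
            (if pvIdx len x.2.1 = i then [(s, x.2.2)] else [])) := by
        rw [List.filter_append]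
        congr 1 <;> (split_ifs <;> simp)
      show _ = _
      rw [hhead, htail (s + ((0 : Nat) : Int)) (by push_cast; omega)]
      simp
    | succ j' =>
      have hhead : (((if pvIdx len x.1 = i then [(s, x.2.2)] else []) ++
          (if pvIdx len x.2.1 = i then [(s, x.2.2)] else [])).filter
            (fun e => e.1 == s + ((j' + 1 : Nat) : Int))) = [] := by
        rw [List.filter_eq_nil_iff]
        intro e he
        rw [List.mem_append] at he
        have he1 : e.1 = s := by
          rcases he with h | h <;> (split_ifs at h <;> simp_all)
        simp only [beq_iff_eq, he1]
        push_cast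
        omega
      rw [hhead]
      have hj' : j' < qs.length := by simpa using hj
      have := ih (s + 1) j' hj'
      rw [List.nil_append]
      have harg : s + ((j' + 1 : Nat) : Int) = (s + 1) + (j' : Int) := by push_cast; ring
      rw [harg, this]
      simp

-- one event entry is a set at its own (in-range) index
theorem pvEventStep_eq (c : PySem.Dict Int Int) (res : List Int) (e : Int × Int)
    (h0 : 0 ≤ e.1) (h1 : e.1 < (res.length : Int)) :
    pvEventStep c res e = res.set e.1.toNat (pvG c (res.getD e.1.toNat 0) e.2) := by
  have hir : PySem.Raise.InRange res.length e.1 := ⟨by omega, h1⟩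
  have hidx : pvIdx res.length e.1 = e.1.toNat := by unfold pvIdx; rw [if_pos h0]
  unfold pvEventStep pvG
  rw [pvGetD_idx _ _ hir, hidx]
  simp only [beq_iff_eq]
  split_ifs with hv <;> rw [pvSetD_idx _ _ hir, hidx]

theorem pv_eventFold_length (c : PySem.Dict Int Int) (L : List (Int × Int))
    (res : List Int) (hL : ∀ e ∈ L, 0 ≤ e.1 ∧ e.1 < (res.length : Int)) :
    (L.foldl (pvEventStep c) res).length = res.length := by
  induction L generalizing res with
  | nil => rfl
  | cons e L ih =>
    obtain ⟨h0, h1⟩ := hL e List.mem_cons_self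
    rw [List.foldl_cons, pvEventStep_eq c res e h0 h1,
      ih _ (by rw [List.length_set]; exact fun r hr => hL r (List.mem_cons_of_mem _ hr)),
      List.length_set]

-- the bucket fold acts on each result slot independently
theorem pv_eventFold_getD (c : PySem.Dict Int Int) (L : List (Int × Int))
    (res : List Int) (hL : ∀ e ∈ L, 0 ≤ e.1 ∧ e.1 < (res.length : Int)) (k : Nat) :
    (L.foldl (pvEventStep c) res).getD k 0 =
      (L.filter (fun e => e.1 == (k : Int))).foldl (fun v e => pvG c v e.2)
        (res.getD k 0) := by
  induction L generalizing res with
  | nil => rfl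
  | cons e L ih =>
    obtain ⟨h0, h1⟩ := hL e List.mem_cons_self
    have hL' : ∀ r ∈ L, 0 ≤ r.1 ∧ r.1 < ((res.set e.1.toNat
        (pvG c (res.getD e.1.toNat 0) e.2)).length : Int) := by
      rw [List.length_set]; exact fun r hr => hL r (List.mem_cons_of_mem _ hr)
    rw [List.foldl_cons, pvEventStep_eq c res e h0 h1, List.filter_cons]
    by_cases hek : e.1 = (k : Int)
    · have hkn : e.1.toNat = k := by omega
      have hklt : k < res.length := by omega
      rw [if_pos (by simpa [beq_iff_eq] using hek), List.foldl_cons,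
        ih _ hL', pv_getD_set, if_pos ⟨hkn, by omega⟩, hkn]
    · rw [if_neg (by simpa [beq_iff_eq] using hek), ih _ hL', pv_getD_set,
        if_neg (fun hc => hek (by omega))]

-- the result of one scan iteration on a single slot
theorem pv_phi_step (nums : List Int) (queries : List (Int × Int × Int)) (j m : Nat)
    (hj : j < queries.length) (c : PySem.Dict Int Int)
    (hC : c.getD ((queries[j]).2.2) 1 = 1 + pvCnt nums ((queries[j]).2.2) m) :
    ((if pvIdx (nums.length + 1) (queries[j]).1 = m then [((j : Int), (queries[j]).2.2)] else []) ++
      (if pvIdx (nums.length + 1) (queries[j]).2.1 = m then [((j : Int), (queries[j]).2.2)] else [])).foldl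
      (fun v e => pvG c v e.2) (pvPhi nums queries j m) = pvPhi nums queries j (m + 1) := by
  have hq : queries.getD j (0, 0, 0) = queries[j] := List.getD_eq_getElem _ _ hj
  unfold pvPhi
  rw [hq]
  dsimp only
  generalize pvIdx (nums.length + 1) (queries[j]).1 = a
  generalize pvIdx (nums.length + 1) (queries[j]).2.1 = b
  generalize hf : pvCnt nums ((queries[j]).2.2) = f at hC
  have hf0 : ∀ p, 0 ≤ f p := by
    intro p; rw [← hf]; exact Int.natCast_nonneg _
  have hfa := hf0 a
  have hfb := hf0 b
  have hfm := hf0 m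
  rcases Nat.lt_trichotomy a b with hab | hab | hab
  · rw [Nat.min_eq_left hab.le, Nat.max_eq_right hab.le]
    by_cases ham : a = m <;> by_cases hbm : b = m <;>
      simp only [ham, hbm, if_pos, if_neg, ite_true, ite_false, List.nil_append,
        List.append_nil, List.foldl_cons, List.foldl_nil] <;>
      first
        | omega
        | (unfold pvG; split_ifs <;> omega)
  · subst hab
    rw [Nat.min_self, Nat.max_self]
    by_cases ham : a = m <;>
      simp only [ham, ite_true, ite_false, List.nil_append, List.append_nil,
        List.foldl_cons, List.foldl_nil, List.cons_append] <;>
      first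
        | omega
        | (unfold pvG; split_ifs <;> omega)
  · rw [Nat.min_eq_right hab.le, Nat.max_eq_left hab.le]
    by_cases ham : a = m <;> by_cases hbm : b = m <;>
      simp only [ham, hbm, if_pos, if_neg, ite_true, ite_false, List.nil_append,
        List.append_nil, List.foldl_cons, List.foldl_nil] <;>
      first
        | omega
        | (unfold pvG; split_ifs <;> omega)

-- slots of absent queries keep the value 0
theorem pv_phi_stable (nums : List Int) (queries : List (Int × Int × Int)) (j m : Nat)
    (hj : queries.length ≤ j) : pvPhi nums queries j m = pvPhi nums queries j (m + 1) := by
  unfold pvPhi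
  rw [List.getD_eq_default _ _ hj]
  have hid : pvIdx (nums.length + 1) (0 : Int) = 0 := by unfold pvIdx; simp
  dsimp only
  rw [hid]
  have hc0 : pvCnt nums 0 0 = 0 := by simp [pvCnt]
  simp only [Nat.min_self, Nat.max_self, hc0]
  split_ifs <;> omega

-- the event table built by the first loop
def pvEvents (nums : List Int) (queries : List (Int × Int × Int)) :
    List (List (Int × Int)) :=
  (PySem.List.enumerate queries 0).foldl pvBuildStep
    (List.replicate (nums.length + 1) ([] : List (Int × Int)))

-- the scan state after the first m iterations
def pvSt (nums : List Int) (queries : List (Int × Int × Int)) (m : Nat) :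
    List Int × PySem.Dict Int Int :=
  (PySem.List.pyRange 0 (m : Int) 1).foldl (pvScanStep nums (pvEvents nums queries))
    (List.replicate queries.length 0, PySem.Dict.empty)

-- the scan invariant: result slots hold pvPhi, the counter holds 1 + prefix counts
theorem pv_scan_inv (nums : List Int) (queries : List (Int × Int × Int))
    (hpre : Pre_rangeCountQueryOffline nums queries) (m : Nat)
    (hm : m ≤ nums.length + 1) :
    (pvSt nums queries m).1.length = queries.length ∧
      (∀ j : Nat, (pvSt nums queries m).1.getD j 0 = pvPhi nums queries j m) ∧
      (∀ t : Int, (pvSt nums queries m).2.getD t 1 =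
        1 + pvCnt nums t (min m nums.length)) := by
  induction m with
  | zero =>
    unfold pvSt
    rw [show (((0 : Nat) : Int)) = 0 by simp, PySem.List.pyRange_one_eq_nil le_rfl,
      List.foldl_nil]
    refine ⟨List.length_replicate, fun j => ?_, fun t => ?_⟩
    · have hrep : (List.replicate queries.length (0 : Int)).getD j 0 = 0 := by
        rcases Nat.lt_or_ge j queries.length with h | h
        · exact List.getD_replicate _ h
        · exact List.getD_eq_default _ _ (by simpa using h)
      rw [hrep]
      unfold pvPhi
      dsimp only
      rw [if_pos (Nat.zero_le _)]
    · rw [PySem.Dict.getD_empty]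
      simp [pvCnt]
  | succ m ih =>
    have hmn : m ≤ nums.length := by omega
    obtain ⟨ihlen, ihres, ihcnt⟩ := ih (by omega)
    have hst : pvSt nums queries (m + 1) =
        pvScanStep nums (pvEvents nums queries) (pvSt nums queries m) (m : Int) := by
      unfold pvSt
      rw [show (((m + 1 : Nat)) : Int) = (m : Int) + 1 by push_cast; ring,
        PySem.List.pyRange_one_succ_right (by positivity), List.foldl_append,
        List.foldl_cons, List.foldl_nil]
    have hbucket : PySem.List.pyGetD (pvEvents nums queries) ((m : Int)) [] =
        pvBucketsOf (nums.length + 1) (PySem.List.enumerate queries 0) m := by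
      rw [PySem.List.pyGetD_natCast]
      unfold pvEvents
      rw [pv_build_getD _ _ m ?hE]
      case hE =>
        rw [List.length_replicate]
        intro p hp
        rw [PySem.List.mem_enumerate_iff] at hp
        obtain ⟨k, hk, rfl⟩ := hp
        exact hpre (queries[k]) (List.getElem_mem hk)
      rw [List.length_replicate]
      have hrep : (List.replicate (nums.length + 1) ([] : List (Int × Int))).getD m [] =
          [] := by
        rcases Nat.lt_or_ge m (nums.length + 1) with h | h
        · exact List.getD_replicate _ h
        · exact List.getD_eq_default _ _ (by simpa using h)
      rw [hrep, List.nil_append]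
    have hentry : ∀ e ∈ pvBucketsOf (nums.length + 1) (PySem.List.enumerate queries 0) m,
        0 ≤ e.1 ∧ e.1 < (((pvSt nums queries m).1.length : Nat) : Int) := by
      intro e he
      obtain ⟨k, hk, he1, _⟩ := pv_bucket_mem he
      rw [ihlen]
      constructor <;> omega
    rw [hst]
    unfold pvScanStep
    dsimp only
    rw [hbucket]
    have hres_len : ((pvBucketsOf (nums.length + 1) (PySem.List.enumerate queries 0)
        m).foldl (pvEventStep (pvSt nums queries m).2) (pvSt nums queries m).1).length =
        queries.length := by
      rw [pv_eventFold_length _ _ _ hentry, ihlen]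
    have hres_getD : ∀ j : Nat, ((pvBucketsOf (nums.length + 1)
        (PySem.List.enumerate queries 0) m).foldl
          (pvEventStep (pvSt nums queries m).2) (pvSt nums queries m).1).getD j 0 =
        pvPhi nums queries j (m + 1) := by
      intro j
      rw [pv_eventFold_getD _ _ _ hentry j, ihres j]
      rcases Nat.lt_or_ge j queries.length with hj | hj
      · have hfil := pv_bucket_filter (nums.length + 1) queries 0 m j hj
        simp only [zero_add] at hfil
        rw [hfil]
        refine pv_phi_step nums queries j m hj _ ?_
        rw [ihcnt ((queries[j]).2.2), Nat.min_eq_left hmn]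
      · have hfil : (pvBucketsOf (nums.length + 1) (PySem.List.enumerate queries 0)
            m).filter (fun e => e.1 == (j : Int)) = [] := by
          rw [List.filter_eq_nil_iff]
          intro e he
          obtain ⟨k, hk, he1, _⟩ := pv_bucket_mem he
          simp only [beq_iff_eq]
          omega
        rw [hfil, List.foldl_nil]
        exact pv_phi_stable nums queries j m hj
    by_cases hcase : m = nums.length
    · have hbeq : (((m : Int)) == PySem.List.len nums) = true := by
        rw [PySem.List.len_eq]
        simp [hcase]
      rw [hbeq]
      simp only [if_true]
      refine ⟨hres_len, hres_getD, fun t => ?_⟩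
      rw [ihcnt t]
      have : min m nums.length = min (m + 1) nums.length := by omega
      rw [this]
    · have hbeq : (((m : Int)) == PySem.List.len nums) = false := by
        rw [PySem.List.len_eq]
        simp
        omega
      rw [hbeq]
      simp only [Bool.false_eq_true, if_false]
      refine ⟨hres_len, hres_getD, fun t => ?_⟩
      have hmlt : m < nums.length := by omega
      rw [PySem.List.pyGetD_natCast]
      rw [PySem.Dict.getD_insert]
      rw [ihcnt t, ihcnt (nums.getD m 0), Nat.min_eq_left hmn,
        Nat.min_eq_left (by omega : m + 1 ≤ nums.length), pvCnt_succ nums t hmlt]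
      rcases eq_or_ne t (nums.getD m 0) with h | h
      · subst h
        split_ifs with h1 <;> omega
      · rw [if_neg h, if_neg (Ne.symm h)]
        omega

-- A equals the per-query map
theorem pv_a_eq_map (nums : List Int) (queries : List (Int × Int × Int))
    (hpre : Pre_rangeCountQueryOffline nums queries) :
    rangeCountQueryOffline nums queries = queries.map (pvF nums) := by
  have hport : rangeCountQueryOffline nums queries =
      (pvSt nums queries (nums.length + 1)).1 := by
    unfold rangeCountQueryOffline pvSt pvEvents
    simp only [PySem.List.len_eq]
    rw [show ((nums.length : Int) + 1) = ((nums.length + 1 : Nat) : Int) by push_cast; ring]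
    rw [Int.toNat_natCast, Int.toNat_natCast]
  obtain ⟨hlen, hres, _⟩ := pv_scan_inv nums queries hpre (nums.length + 1) le_rfl
  rw [hport]
  apply List.ext_getElem
  · rw [hlen, List.length_map]
  · intro j hj1 hj2
    have hjq : j < queries.length := by rw [hlen] at hj1; exact hj1
    have h1 : (pvSt nums queries (nums.length + 1)).1[j] =
        (pvSt nums queries (nums.length + 1)).1.getD j 0 :=
      (List.getD_eq_getElem _ _ hj1).symm
    rw [h1, hres j]
    rw [List.getElem_map]
    obtain ⟨hq1, hq2⟩ := hpre (queries[j]) (List.getElem_mem hjq)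
    have hlt1 := pvIdx_lt hq1
    have hlt2 := pvIdx_lt hq2
    unfold pvPhi pvF
    rw [List.getD_eq_getElem _ _ hjq]
    dsimp only
    rw [if_neg (by omega), if_neg (by omega)]

-- ===== VERDICT (by name: the statement is the Claim_ definition above) =====
theorem rangeCountQueryOffline_spec : Claim_equal_rangeCountQueryOffline := by
  intro nums queries _ hpre
  unfold Spec_rangeCountQueryOffline
  rw [pv_a_eq_map nums queries hpre, pv_alt_eq_map nums queries hpre]
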